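-- pv_equiv track=rewrite | github.com/pdrok/logica-general | python_3/ej5.py | estan_ordenados
-- ===== SOURCE A (Python) =====
-- def estan_ordenados(registros):
--     # Comprobar si la lista está vacía o tiene un solo elemento
--     if len(registros) < 2:
--         return True
--
--     for i in range(1, len(registros)):
--         # Si encontramos el valor 0, detenemos el proceso
--         if registros[i] == 0:
--             return True
--         # Si el valor actual es menor que el anterior, la lista no está ordenada
--         if registros[i] < registros[i - 1]:
--             return False
--     return True
-- ===== SOURCE B (Python) =====
-- def estan_ordenados(registros):
--     # Sentinel search starts at index 1: a 0 in first position is a normal value.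
--     tail = registros[1:]
--     cutoff = (tail.index(0) + 1) if 0 in tail else len(registros)
--     prefix = registros[:cutoff]
--     return prefix == sorted(prefix)
-- ===== Notes on version B (the rewrite author's own statement) =====
-- stated objective: simpler
-- what changed: B replaces A's indexed pairwise-comparison loop with a cutoff at the first zero sentinel (index >= 1) and a single prefix == sorted(prefix) comparison.
import Mathlib
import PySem

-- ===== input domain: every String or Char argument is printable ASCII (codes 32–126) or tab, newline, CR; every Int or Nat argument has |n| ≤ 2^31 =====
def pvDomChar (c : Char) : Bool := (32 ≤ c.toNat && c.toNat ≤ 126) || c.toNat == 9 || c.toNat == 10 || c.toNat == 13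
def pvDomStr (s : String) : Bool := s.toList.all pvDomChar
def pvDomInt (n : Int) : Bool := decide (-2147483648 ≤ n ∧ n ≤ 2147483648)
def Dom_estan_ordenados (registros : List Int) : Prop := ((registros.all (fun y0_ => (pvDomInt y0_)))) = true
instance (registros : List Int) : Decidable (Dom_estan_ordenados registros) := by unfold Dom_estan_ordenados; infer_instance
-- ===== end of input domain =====

-- B checks the prefix before the first zero sentinel (index ≥ 1) with one prefix == sorted(prefix) comparison instead of A's indexed pairwise loop; objective: simpler.

-- ===== PORT A =====
-- A's for-loop over indices 1..len-1 as the obvious structural recursion carrying the previous element.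
def pvGoA (prev : Int) : List Int → Bool
  | [] => true
  | x :: xs => if x == 0 then true else if x < prev then false else pvGoA x xs

def estan_ordenados (registros : List Int) : Bool :=
  if registros.length < 2 then true
  else
    match registros with
    | [] => true
    | x :: xs => pvGoA x xs

-- ===== PORT B =====
def estan_ordenados_alt (registros : List Int) : Bool :=
  let tail := PySem.List.slice registros (some 1) none          -- registros[1:]
  let cutoff : Nat :=
    match PySem.List.index? tail 0 with                          -- 0 in tail / tail.index(0)
    | some i => i + 1
    | none => registros.length
  let pref := PySem.List.slice registros none (some (cutoff : Int))   -- registros[:cutoff]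
  decide (pref = PySem.List.sorted pref (fun x => x) false)            -- pref == sorted(pref)

-- ===== PRECONDITION & SPEC =====
def Spec_estan_ordenados (registros : List Int) (out : Bool) : Prop := out = estan_ordenados_alt registros
instance (registros : List Int) (out : Bool) : Decidable (Spec_estan_ordenados registros out) := by unfold Spec_estan_ordenados; infer_instance

-- ===== CLAIM (what is proved, stated in full; the proofs are below) =====
def Claim_equal_estan_ordenados : Prop := ∀ (registros : List Int), Dom_estan_ordenados registros → Spec_estan_ordenados registros (estan_ordenados registros)

-- ===== LEMMAS AND PROOFS =====

-- The prefix B builds from x :: xs is x followed by xs up to (excluding) the first zero.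
theorem pv_prefix_eq (x : Int) (xs : List Int) :
    PySem.List.slice (x :: xs) none
      (some ((match PySem.List.index? (PySem.List.slice (x :: xs) (some 1) none) 0 with
              | some i => i + 1
              | none => (x :: xs).length : Nat) : Int))
      = x :: xs.takeWhile (fun a => !(a == 0)) := by
  rw [PySem.List.slice_from_one]
  simp only [List.tail_cons]
  cases h : PySem.List.index? xs 0 with
  | none =>
    have hnm : (0:Int) ∉ xs := (PySem.List.index?_eq_none_iff xs 0).mp h
    rw [PySem.List.slice_to_natCast]
    have htw : xs.takeWhile (fun a => !(a == (0:Int))) = xs := by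
      rw [List.takeWhile_eq_self_iff]
      intro a ha
      simp only [Bool.not_eq_eq_eq_not, Bool.not_true, beq_eq_false_iff_ne]
      exact fun e => hnm (e ▸ ha)
    rw [htw]
    simp
  | some i =>
    obtain ⟨pre, suf, hx, hlen, hnm⟩ := (PySem.List.index?_eq_some_iff xs 0 i).mp h
    rw [PySem.List.slice_to_natCast]
    subst hx
    rw [List.take_succ_cons]
    congr 1
    have hpre : pre.takeWhile (fun a => !(a == (0:Int))) = pre := by
      rw [List.takeWhile_eq_self_iff]
      intro a ha
      simp only [Bool.not_eq_eq_eq_not, Bool.not_true, beq_eq_false_iff_ne]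
      exact fun e => hnm (e ▸ ha)
    rw [List.takeWhile_append, hpre, if_pos rfl, ← hlen, List.take_left]
    simp

-- Python's sorted leaves a list unchanged iff the list is pairwise ≤.
theorem pv_sorted_fix_iff (l : List Int) :
    PySem.List.sorted l (fun x => x) false = l ↔ l.Pairwise (· ≤ ·) := by
  constructor
  · intro h
    have := PySem.List.sorted_pairwise (xs := l) (key := fun x => x)
    rw [h] at this
    exact this
  · intro h
    exact PySem.List.sorted_eq_self_of_pairwise l (fun x => x) h

-- A's loop decides sortedness of the prefix before the first zero.
theorem pv_goA_pairwise (xs : List Int) : ∀ (x : Int),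
    pvGoA x xs = decide (List.Pairwise (· ≤ ·) (x :: xs.takeWhile (fun a => !(a == 0)))) := by
  induction xs with
  | nil => intro x; simp [pvGoA]
  | cons y ys ih =>
    intro x
    by_cases hy : y = 0
    · subst hy; simp [pvGoA]
    · have hb : (y == (0:Int)) = false := by simpa using hy
      have htw : List.takeWhile (fun a => !(a == (0:Int))) (y :: ys)
          = y :: List.takeWhile (fun a => !(a == (0:Int))) ys := by
        simp [hb]
      rw [htw]
      by_cases hlt : y < x
      · have hnp : ¬ List.Pairwise (fun a b : Int => a ≤ b)
            (x :: y :: List.takeWhile (fun a => !(a == (0:Int))) ys) := fun hp =>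
          absurd (List.rel_of_pairwise_cons hp List.mem_cons_self) (not_le.mpr hlt)
        simp only [pvGoA, hb, Bool.false_eq_true, if_false, if_pos hlt]
        exact (decide_eq_false hnp).symm
      · have hxy : x ≤ y := not_lt.mp hlt
        have hiff : List.Pairwise (fun a b : Int => a ≤ b)
              (x :: y :: List.takeWhile (fun a => !(a == (0:Int))) ys)
            ↔ List.Pairwise (fun a b : Int => a ≤ b)
              (y :: List.takeWhile (fun a => !(a == (0:Int))) ys) := by
          constructor
          · exact List.Pairwise.of_cons
          · intro hp
            refine List.pairwise_cons.mpr ⟨?_, hp⟩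
            intro z hz
            rcases List.mem_cons.mp hz with rfl | hz'
            · exact hxy
            · exact le_trans hxy (List.rel_of_pairwise_cons hp hz')
        simp only [pvGoA, hb, Bool.false_eq_true, if_false, if_neg hlt, ih y]
        exact decide_eq_decide.mpr hiff.symm

-- ===== VERDICT (by name: the statement is the Claim_ definition above) =====
theorem estan_ordenados_spec : Claim_equal_estan_ordenados := by
  intro registros _
  unfold Spec_estan_ordenados estan_ordenados estan_ordenados_alt
  cases registros with
  | nil => decide
  | cons x xs =>
    simp only []
    rw [pv_prefix_eq x xs]
    cases xs with
    | nil =>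
      have h1 : PySem.List.sorted [x] (fun z => z) false = [x] :=
        PySem.List.sorted_eq_self_of_pairwise [x] (fun z => z) (by simp)
      simp [h1]
    | cons y ys =>
      rw [if_neg (by simp), pv_goA_pairwise]
      have := pv_sorted_fix_iff (x :: List.takeWhile (fun a => !(a == (0:Int))) (y :: ys))
      rw [(decide_eq_decide.mpr (by rw [eq_comm]; exact this) :
        decide (x :: List.takeWhile (fun a => !(a == (0:Int))) (y :: ys) =
          PySem.List.sorted (x :: List.takeWhile (fun a => !(a == (0:Int))) (y :: ys)) (fun z => z) false)
        = decide (List.Pairwise (· ≤ ·) (x :: List.takeWhile (fun a => !(a == (0:Int))) (y :: ys))))]
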